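-- pv_equiv track=rewrite | github.com/flikhamud45/liri | unit 5/5.4.py | mult_num
-- ===== SOURCE A (Python) =====
-- def mult_num(id):
--     final_lst = []
--     for i in range(len(str(id))):
--         num = int(str(id)[i])
--         result = 0
--         if (i+1) % 2 == 0:
--             num = num *2
--         if num > 9 :
--             while num > 0:
--                 result += num%10
--                 num = int(num/10)
--         else:
--             result = num
--         final_lst.append(result)
--     return final_lst
-- ===== SOURCE B (Python) =====
-- def _luhn(d):
--     x = 2 * d
--     return x - 9 if x > 9 else x
--
-- def mult_num(id):
--     return [_luhn(int(ch)) if pos % 2 == 0 else int(ch)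
--             for pos, ch in enumerate(str(id), 1)]
-- ===== Notes on version B (the rewrite author's own statement) =====
-- stated objective: simpler
-- what changed: Replaces the index loop with an inner while-loop digit-summing pass by a single comprehension over enumerate(str(id),1) using the Luhn closed form (2d-9 when 2d>9), eliminating the inner loop and all indexing.
import Mathlib
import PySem

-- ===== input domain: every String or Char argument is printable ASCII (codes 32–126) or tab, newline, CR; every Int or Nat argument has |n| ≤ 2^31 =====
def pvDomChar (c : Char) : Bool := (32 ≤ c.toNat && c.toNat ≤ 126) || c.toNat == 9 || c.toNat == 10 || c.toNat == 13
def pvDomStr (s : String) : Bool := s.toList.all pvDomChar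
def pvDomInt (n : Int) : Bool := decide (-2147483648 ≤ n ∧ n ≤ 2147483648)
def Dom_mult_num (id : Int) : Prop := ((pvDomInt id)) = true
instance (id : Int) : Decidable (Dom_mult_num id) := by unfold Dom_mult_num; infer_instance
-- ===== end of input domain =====

-- B replaces A's index loop with an inner digit-summing while-loop by one pass over
-- enumerate(str(id), 1) using the Luhn closed form 2d-9 for 2d > 9 (objective: simpler).

-- ===== PORT A =====
-- the `while num > 0` loop of A; the Nat argument is fuel that only makes the loop
-- structural (one unit per iteration; callers pass num.toNat, which always suffices
-- since int(num/10) strictly decreases a positive num).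
def pvSumDigits : Nat → Int → Int → Int
  | 0, _, result => result
  | fuel + 1, num, result =>
    if num > 0 then
      -- int(num/10) here is exact truncating division: PySem.Int.truncdiv
      pvSumDigits fuel (PySem.Int.truncdiv num 10) (result + PySem.Int.mod num 10)
    else result

def mult_num (id : Int) : List Int :=
  let s := PySem.Int.toStr id
  (PySem.List.pyRange 0 (PySem.Str.len s) 1).foldl
    (fun final_lst i =>
      -- num = int(str(id)[i]); int() of the 1-char string is ofChars? [c]
      let num0 := (PySem.Int.ofChars? [(PySem.Str.pyGet? s i).getD ' ']).getD 0
      let num := if PySem.Int.mod (i + 1) 2 = 0 then num0 * 2 else num0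
      let result := if num > 9 then pvSumDigits num.toNat num 0 else num
      final_lst ++ [result]) []

-- ===== PORT B =====
def pvLuhn (d : Int) : Int :=
  let x := 2 * d
  if x > 9 then x - 9 else x

def mult_num_alt (id : Int) : List Int :=
  (PySem.List.enumerate (PySem.Int.toStr id).toList 1).map
    (fun p =>
      if PySem.Int.mod p.1 2 = 0 then pvLuhn ((PySem.Int.ofChars? [p.2]).getD 0)
      else (PySem.Int.ofChars? [p.2]).getD 0)

-- ===== PRECONDITION & SPEC =====
-- On id < 0 str(id) contains '-' and int('-') raises ValueError in both A and B.
def Pre_mult_num (id : Int) : Prop := 0 ≤ id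
instance (id : Int) : Decidable (Pre_mult_num id) := by unfold Pre_mult_num; infer_instance
def pvWitness_mult_num : Int := (507)

def Spec_mult_num (id : Int) (out : List Int) : Prop := out = mult_num_alt id
instance (id : Int) (out : List Int) : Decidable (Spec_mult_num id out) := by unfold Spec_mult_num; infer_instance

-- ===== CLAIM (what is proved, stated in full; the proofs are below) =====
def Claim_equal_mult_num : Prop := ∀ (id : Int), Dom_mult_num id → Pre_mult_num id → Spec_mult_num id (mult_num id)

-- ===== LEMMAS AND PROOFS =====
def pvDigits : List Char := ['0','1','2','3','4','5','6','7','8','9']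

lemma pvDigitChar_mem (m : Nat) (h : m < 10) : m.digitChar ∈ pvDigits := by
  interval_cases m <;> decide

lemma pvToDigitsCore_mem (fuel : Nat) :
    ∀ (n : Nat) (acc : List Char), (∀ c ∈ acc, c ∈ pvDigits) →
      ∀ c ∈ Nat.toDigitsCore 10 fuel n acc, c ∈ pvDigits := by
  induction fuel with
  | zero => intro n acc hacc c hc; exact hacc c hc
  | succ fuel ih =>
    intro n acc hacc c hc
    simp only [Nat.toDigitsCore] at hc
    by_cases h0 : n / 10 = 0
    · rw [if_pos h0] at hc
      rcases List.mem_cons.1 hc with h | h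
      · exact h ▸ pvDigitChar_mem _ (Nat.mod_lt _ (by omega))
      · exact hacc c h
    · rw [if_neg h0] at hc
      refine ih _ _ ?_ c hc
      intro d hd
      rcases List.mem_cons.1 hd with h | h
      · exact h ▸ pvDigitChar_mem _ (Nat.mod_lt _ (by omega))
      · exact hacc d h

lemma pvToChars_digits (id : Int) (h : 0 ≤ id) :
    ∀ c ∈ PySem.Int.toChars id, c ∈ pvDigits := by
  unfold PySem.Int.toChars
  rw [if_neg (by omega)]
  exact pvToDigitsCore_mem _ _ _ (by simp)

lemma pvStep_eq (c : Char) (hc : c ∈ pvDigits) (e : Prop) [Decidable e] :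
    (let num0 := (PySem.Int.ofChars? [c]).getD 0
     let num := if e then num0 * 2 else num0
     if num > 9 then pvSumDigits num.toNat num 0 else num)
    = (if e then pvLuhn ((PySem.Int.ofChars? [c]).getD 0)
       else (PySem.Int.ofChars? [c]).getD 0) := by
  fin_cases hc <;> by_cases he : e <;>
    simp only [he, if_pos, if_neg, not_false_iff] <;> decide

lemma pvMain (cs : List Char) (hd : ∀ c ∈ cs, c ∈ pvDigits) :
    (PySem.List.pyRange 0 (cs.length : Int) 1).foldl
      (fun fl i =>
        let num0 := (PySem.Int.ofChars? [(PySem.List.pyGet? cs i).getD ' ']).getD 0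
        let num := if PySem.Int.mod (i + 1) 2 = 0 then num0 * 2 else num0
        let result := if num > 9 then pvSumDigits num.toNat num 0 else num
        fl ++ [result]) []
    = (PySem.List.enumerate cs 1).map
        (fun p =>
          if PySem.Int.mod p.1 2 = 0 then pvLuhn ((PySem.Int.ofChars? [p.2]).getD 0)
          else (PySem.Int.ofChars? [p.2]).getD 0) := by
  rw [show (PySem.List.pyRange 0 (cs.length : Int) 1) = PySem.List.pyRange 0 (cs.length : Int) from rfl,
      PySem.List.pyRange_zero_natCast]
  rw [PySem.List.foldl_append_singleton_eq_map
        (f := fun i => let num0 := (PySem.Int.ofChars? [(PySem.List.pyGet? cs i).getD ' ']).getD 0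
                       let num := if PySem.Int.mod (i + 1) 2 = 0 then num0 * 2 else num0
                       if num > 9 then pvSumDigits num.toNat num 0 else num)]
  rw [List.nil_append, List.map_map]
  apply List.ext_getElem
  · simp
  · intro k hk1 hk2
    simp only [List.getElem_map, List.getElem_range, Function.comp_apply,
      PySem.List.getElem_enumerate]
    rw [show ((1 : Int) + ↑k) = (↑k + 1) from by ring]
    have hklt : k < cs.length := by simpa using hk2
    rw [PySem.List.pyGet?_natCast, List.getElem?_eq_getElem hklt, Option.getD_some]
    exact pvStep_eq cs[k] (hd _ (List.getElem_mem _)) _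

-- ===== VERDICT (by name: the statement is the Claim_ definition above) =====
theorem mult_num_spec : Claim_equal_mult_num := by
  intro id _ hpre
  unfold Spec_mult_num mult_num mult_num_alt
  simp only [PySem.Str.len_eq, PySem.Int.toList_toStr, PySem.Str.pyGet?,
    PySem.Chars.pyGet?_eq_listPyGet?]
  exact pvMain _ (pvToChars_digits id hpre)
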